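-- pv_equiv track=rewrite | github.com/dizzybeaver/SIMA | tools/file_server/generate-urls.py | group_paths_by_directory
-- ===== SOURCE A (Python) =====
-- from typing import Tuple, List, Dict
--
-- def group_paths_by_directory(paths: List[str]) -> Dict[str, List[str]]:
--     """
--     Group file paths by their parent directory
--
--     Args:
--         paths: List of file paths
--
--     Returns:
--         Dictionary mapping directory names to list of file paths
--     """
--     grouped = {}
--
--     for path in paths:
--         if '/' in path:
--             dir_name = path.rsplit('/', 1)[0]
--         else:
--             dir_name = 'root'
--
--         if dir_name not in grouped:
--             grouped[dir_name] = []
--         grouped[dir_name].append(path)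
--
--     return grouped
-- ===== SOURCE B (Python) =====
-- def group_paths_by_directory(paths):
--     """Group file paths by their parent directory (keys-then-filter decomposition)."""
--     def key(p):
--         return p.rsplit('/', 1)[0] if '/' in p else 'root'
--     order = list(dict.fromkeys(key(p) for p in paths))
--     return {k: [p for p in paths if key(p) == k] for k in order}
-- ===== Notes on version B (the rewrite author's own statement) =====
-- stated objective: alternative
-- what changed: Replaces A's single mutate-as-you-go dict-building pass by a two-phase decomposition: first dedup the directory keys in first-occurrence order (dict.fromkeys), then build each group by filtering the input once per key.
import Mathlib
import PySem

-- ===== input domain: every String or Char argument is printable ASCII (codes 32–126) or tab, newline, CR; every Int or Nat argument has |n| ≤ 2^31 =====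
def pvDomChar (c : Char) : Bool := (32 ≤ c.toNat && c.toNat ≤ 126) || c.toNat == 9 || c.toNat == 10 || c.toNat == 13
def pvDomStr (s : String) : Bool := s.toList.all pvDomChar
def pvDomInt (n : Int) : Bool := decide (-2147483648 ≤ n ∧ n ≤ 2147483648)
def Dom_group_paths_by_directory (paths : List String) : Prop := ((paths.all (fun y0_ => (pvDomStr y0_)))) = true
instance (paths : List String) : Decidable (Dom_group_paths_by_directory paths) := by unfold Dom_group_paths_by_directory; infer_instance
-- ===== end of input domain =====

-- B replaces A's single dict-mutating pass by a two-phase decomposition (dedup the keys, then one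
-- filter per key); same return value (objective: alternative).

-- shared key helper: "path.rsplit('/', 1)[0] if '/' in path else 'root'" — both Pythons compute this
-- identically. rsplit('/',1)[0] (the prefix before the LAST '/') is ported by hand, exact on all
-- strings containing '/': reverse, drop up to and including the first '/', reverse back.
def pyDirName (path : String) : String :=
  if PySem.Str.isIn "/" path then
    String.ofList (((path.toList.reverse.dropWhile (fun c => c ≠ '/')).drop 1).reverse)
  else "root"

-- ===== PORT A =====
-- loop body of A: membership test, optional fresh empty entry, then append to the entry
def pvStepA (g : PySem.Dict String (List String)) (path : String) : PySem.Dict String (List String) :=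
  let dir := pyDirName path
  let g' := if g.contains dir then g else g.insert dir ([] : List String)
  g'.insert dir (g'.getD dir [] ++ [path])

def group_paths_by_directory (paths : List String) : List (String × List String) :=
  (paths.foldl pvStepA PySem.Dict.empty).items

-- ===== PORT B =====
-- list(dict.fromkeys(...)) = PySem.List.dedup; then one list comprehension (filter) per key
def group_paths_by_directory_alt (paths : List String) : List (String × List String) :=
  (PySem.List.dedup (paths.map pyDirName)).map
    (fun k => (k, paths.filter (fun p => pyDirName p == k)))

-- ===== PRECONDITION & SPEC =====
def Spec_group_paths_by_directory (paths : List String) (out : List (String × List String)) : Prop := out = group_paths_by_directory_alt paths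
instance (paths : List String) (out : List (String × List String)) : Decidable (Spec_group_paths_by_directory paths out) := by unfold Spec_group_paths_by_directory; infer_instance

-- ===== CLAIM (what is proved, stated in full; the proofs are below) =====
def Claim_equal_group_paths_by_directory : Prop := ∀ (paths : List String), Dom_group_paths_by_directory paths → Spec_group_paths_by_directory paths (group_paths_by_directory paths)

-- ===== LEMMAS AND PROOFS =====

-- the loop invariant: A's dict items are exactly B's dedup-then-filter grouping
theorem pvItems_eq (xs : List String) :
    (xs.foldl pvStepA PySem.Dict.empty).items
      = (PySem.List.dedup (xs.map pyDirName)).map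
          (fun k => (k, xs.filter (fun p => pyDirName p == k))) := by
  induction xs using List.reverseRecOn with
  | nil => rfl
  | append_singleton xs p ih =>
    rw [List.foldl_append]
    set d := xs.foldl pvStepA PySem.Dict.empty with hd
    set k := pyDirName p with hk
    have hkeys : d.keys = PySem.List.dedup (xs.map pyDirName) := by
      show d.items.map Prod.fst = _
      rw [ih, List.map_map]; simp [Function.comp_def]
    have hnd : d.keys.Nodup := by rw [hkeys]; exact PySem.List.nodup_dedup _
    have hcont : d.contains k = decide (k ∈ PySem.List.dedup (xs.map pyDirName)) := by
      rw [PySem.Dict.contains_eq_decide_mem_keys, hkeys]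
    by_cases hmem : k ∈ PySem.List.dedup (xs.map pyDirName)
    · -- the directory is already a key: the entry at k gains p, everything else is unchanged
      have hc : d.contains k = true := by rw [hcont]; exact decide_eq_true hmem
      have hget : d.getD k [] = xs.filter (fun p => pyDirName p == k) :=
        PySem.Dict.getD_of_mem_items d (by rw [ih]; exact List.mem_map_of_mem hmem) hnd []
      show (pvStepA d p).items = _
      unfold pvStepA
      rw [← hk]
      simp only [hc, if_true]
      rw [PySem.Dict.items_insert_of_contains d _ hc, hget, ih]
      rw [List.map_map]
      have hded : PySem.List.dedup ((xs ++ [p]).map pyDirName)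
          = PySem.List.dedup (xs.map pyDirName) := by
        simp only [List.map_append, List.map_cons, List.map_nil, PySem.List.dedup_eq_ofList,
          PySem.Set.ofList_append_singleton]
        rw [PySem.Set.add_of_mem]
        simpa using hmem
      rw [hded]
      apply List.map_congr_left
      intro x hx
      by_cases hxk : x = k
      · subst hxk
        simp [List.filter_append, hk]
      · have : ¬ (pyDirName p == x) := by simp [← hk, Ne.symm hxk]
        simp only [Function.comp_apply]
        rw [if_neg (by simpa using hxk)]
        simp [List.filter_append, this]
    · -- a fresh directory: a new entry (k, [p]) is appended at the end
      have hc : d.contains k = false := by rw [hcont]; exact decide_eq_false hmem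
      show (pvStepA d p).items = _
      unfold pvStepA
      rw [← hk]
      simp only [hc, Bool.false_eq_true, if_false]
      rw [PySem.Dict.insert_insert_self, PySem.Dict.getD_insert_self]
      rw [PySem.Dict.items_insert_of_not_contains d _ hc, ih]
      have hded : PySem.List.dedup ((xs ++ [p]).map pyDirName)
          = PySem.List.dedup (xs.map pyDirName) ++ [k] := by
        simp only [List.map_append, List.map_cons, List.map_nil, PySem.List.dedup_eq_ofList,
          PySem.Set.ofList_append_singleton]
        rw [PySem.Set.add_of_not_mem]
        simpa using hmem
      rw [hded, List.map_append]
      congr 1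
      · apply List.map_congr_left
        intro x hx
        have hxk : x ≠ k := fun h => hmem (h ▸ hx)
        have : ¬ (pyDirName p == x) := by simp [← hk, Ne.symm hxk]
        simp [List.filter_append, this]
      · simp [List.filter_append, hk]
        intro a ha h
        apply hmem
        rw [PySem.List.mem_dedup, hk, ← h]
        exact List.mem_map_of_mem ha

-- ===== VERDICT (by name: the statement is the Claim_ definition above) =====
theorem group_paths_by_directory_spec : Claim_equal_group_paths_by_directory := by
  intro paths _
  unfold Spec_group_paths_by_directory group_paths_by_directory group_paths_by_directory_alt
  exact pvItems_eq paths
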